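-- pv_equiv track=rewrite | github.com/colbyshores/doom3do-redux | prototype.py | build_span_table
-- ===== SOURCE A (Python) =====
-- from collections import defaultdict
--
-- def build_span_table(outline, screen_w, screen_h):
--     crossings = defaultdict(list)   # y -> [floor_x, ...]  (one per edge crossing)
--
--     n = len(outline)
--     for i in range(n):
--         x0, y0 = outline[i]
--         x1, y1 = outline[(i + 1) % n]
--
--         if y0 == y1:
--             continue                # skip horizontal edges
--
--         if y0 > y1:                 # orient top-to-bottom
--             x0, y0, x1, y1 = x1, y1, x0, y0
--
--         dx = x1 - x0
--         dy = y1 - y0               # always > 0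
--
--         # top-inclusive / bottom-exclusive avoids double-counting at vertices
--         for y in range(max(y0, 0), min(y1, screen_h)):
--             num      = dx * (y - y0)
--             floor_ix = x0 + num // dy
--             rem      = num - (num // dy) * dy   # always in [0, dy)
--             # Store both values so we can round inward later
--             crossings[y].append((floor_ix, floor_ix + (1 if rem else 0)))
--
--     spans = {}
--     for y, xs in crossings.items():
--         xs.sort()                   # sort by floor value (left to right)
--
--         # Even-odd pairing: pair 0, pair 1, …  each pair is a filled interval.
--         # Left  edge of pair: use ceiling (round right = inward)
--         # Right edge of pair: use floor   (round left  = inward)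
--         row_spans = []
--         i = 0
--         while i + 1 < len(xs):
--             x_min = xs[i][1]        # ceil
--             x_max = xs[i+1][0]     # floor
--             if x_min < 0:
--                 x_min = 0
--             if x_max >= screen_w:
--                 x_max = screen_w - 1
--             if x_min <= x_max:
--                 row_spans.append((x_min, x_max))
--             i += 2
--
--         if row_spans:
--             spans[y] = row_spans
--
--     return spans
-- ===== SOURCE B (Python) =====
-- def _pairs(xs, screen_w):
--     # Even-odd pairing, recursively: consume two crossings at a time.
--     if len(xs) < 2:
--         return []
--     lo = max(xs[0][1], 0)              # ceil of left crossing, clipped left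
--     hi = min(xs[1][0], screen_w - 1)   # floor of right crossing, clipped right
--     rest = _pairs(xs[2:], screen_w)
--     return ([(lo, hi)] if lo <= hi else []) + rest
--
--
-- def _cross(e, y):
--     x0, y0, x1, y1 = e
--     q, r = divmod((x1 - x0) * (y - y0), y1 - y0)
--     fx = x0 + q
--     return (fx, fx + (1 if r else 0))
--
--
-- def _row(edges, y, screen_w, screen_h):
--     xs = sorted(_cross(e, y) for e in edges
--                 if max(e[1], 0) <= y < min(e[3], screen_h))
--     return _pairs(xs, screen_w)
--
--
-- def build_span_table(outline, screen_w, screen_h):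
--     n = len(outline)
--
--     # Normalised edge table: oriented top-to-bottom, horizontals dropped.
--     edges = []
--     for i in range(n):
--         x0, y0 = outline[i]
--         x1, y1 = outline[(i + 1) % n]
--         if y0 != y1:
--             if y0 > y1:
--                 x0, y0, x1, y1 = x1, y1, x0, y0
--             edges.append((x0, y0, x1, y1))
--
--     # Rows touched by any edge, in first-touch order.
--     rows = []
--     seen = set()
--     for x0, y0, x1, y1 in edges:
--         for y in range(max(y0, 0), min(y1, screen_h)):
--             if y not in seen:
--                 seen.add(y)
--                 rows.append(y)
--
--     # Row-major gather: each row scans the edge table for its crossings,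
--     # sorts them and pairs even-odd; rows are distinct, so the comprehension
--     # never overwrites a key.
--     return {y: row
--             for y, row in ((y, _row(edges, y, screen_w, screen_h)) for y in rows)
--             if row}
-- ===== Notes on version B (the rewrite author's own statement) =====
-- stated objective: alternative
-- what changed: B transposes the traversal: instead of A's edge-major scatter of crossings into a y-keyed defaultdict followed by iterating the dict with an index-based while-loop pairing, B builds a normalised edge table once, lists the touched rows, and for each row gathers its crossings by scanning the edge table (row-major gather, no dict of lists), then pairs them with a recursive even-odd pairing function.
import Mathlib
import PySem

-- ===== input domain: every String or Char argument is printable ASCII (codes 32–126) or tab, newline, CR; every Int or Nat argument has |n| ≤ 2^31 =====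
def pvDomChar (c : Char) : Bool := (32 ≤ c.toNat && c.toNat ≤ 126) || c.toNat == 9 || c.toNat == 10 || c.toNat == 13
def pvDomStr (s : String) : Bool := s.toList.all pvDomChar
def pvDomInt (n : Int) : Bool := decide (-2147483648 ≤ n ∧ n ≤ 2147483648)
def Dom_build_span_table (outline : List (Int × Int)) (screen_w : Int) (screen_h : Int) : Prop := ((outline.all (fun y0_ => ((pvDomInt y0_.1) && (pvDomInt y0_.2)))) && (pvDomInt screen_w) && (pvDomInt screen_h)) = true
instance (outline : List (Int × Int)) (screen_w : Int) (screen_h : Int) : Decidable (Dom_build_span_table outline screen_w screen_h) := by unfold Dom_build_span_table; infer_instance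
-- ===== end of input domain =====

-- B transposes A's traversal: instead of scattering edge crossings into a y-keyed dict and then
-- iterating it, B builds a normalised edge table once, lists the touched rows, and gathers each
-- row's crossings by scanning the edge table, pairing them recursively; objective: alternative.
-- Loop counts here are coordinate-driven (up to ~10^5 rows for inputs Python handles in
-- milliseconds), so in BOTH ports Python's dict/set is ported by hand as a hash map/hash set plus
-- the keys in insertion order (reversed while building); this is exact: same mapping, same
-- insertion order, same per-key append order, only the container's representation differs.

-- ===== PORT A =====
def pairLoopA (screen_w : Int) (xs : List (Int × Int)) (i : Nat) (acc : List (Int × Int)) : List (Int × Int) :=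
  if h : i + 1 < xs.length then
    let x_min := (xs.getD i ((0:Int),(0:Int))).2
    let x_max := (xs.getD (i+1) ((0:Int),(0:Int))).1
    let x_min := if x_min < 0 then 0 else x_min
    let x_max := if screen_w ≤ x_max then screen_w - 1 else x_max
    let acc := if x_min ≤ x_max then acc ++ [(x_min, x_max)] else acc
    pairLoopA screen_w xs (i+2) acc
  else acc
termination_by xs.length - i
decreasing_by omega

def build_span_table (outline : List (Int × Int)) (screen_w : Int) (screen_h : Int) : List (Int × List (Int × Int)) :=
  let n : Int := PySem.List.len outline
  -- crossings: defaultdict(list), ported by hand as (hash map, keys in reverse insertion order);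
  -- crossings[y].append(c) = insert the appended list, record y on first touch (exact, see header)
  let crossings : Std.HashMap Int (List (Int × Int)) × List Int :=
    (PySem.List.pyRange 0 n 1).foldl (fun cr i =>
      let p0 := PySem.List.pyGetD outline i ((0:Int),(0:Int))
      let p1 := PySem.List.pyGetD outline (PySem.Int.mod (i+1) n) ((0:Int),(0:Int))
      if p0.2 = p1.2 then cr
      else
        let e := if p0.2 > p1.2 then (p1.1, p1.2, p0.1, p0.2) else (p0.1, p0.2, p1.1, p1.2)
        let x0 := e.1
        let y0 := e.2.1
        let x1 := e.2.2.1
        let y1 := e.2.2.2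
        let dx := x1 - x0
        let dy := y1 - y0
        (PySem.List.pyRange (max y0 0) (min y1 screen_h) 1).foldl (fun cr y =>
            match cr with
            | (m, ord) =>
              let num := dx * (y - y0)
              let q := PySem.Int.floordiv num dy
              let floor_ix := x0 + q
              let rem := num - q * dy
              let c := m.contains y
              (m.insert y (m.getD y [] ++ [(floor_ix, floor_ix + (if rem ≠ 0 then 1 else 0))]),
               if c then ord else y :: ord)) cr)
      (∅, [])
  -- crossings.items() in insertion order
  let itemsList : List (Int × List (Int × Int)) :=
    crossings.2.reverse.map (fun y => (y, crossings.1.getD y []))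
  -- spans: a dict written once per fresh key, ported as its reversed item list (exact, see header)
  let spans : List (Int × List (Int × Int)) :=
    itemsList.foldl (fun sp p =>
      let xs := PySem.List.sorted2 p.2 (fun q => q.1) (fun q => q.2) false
      let row_spans := pairLoopA screen_w xs 0 []
      if row_spans ≠ [] then (p.1, row_spans) :: sp else sp) []
  spans.reverse

-- ===== PORT B =====
-- _pairs: recursive even-odd pairing
def bPairs (screen_w : Int) : List (Int × Int) → List (Int × Int)
  | a :: b :: r =>
      (if max a.2 0 ≤ min b.1 (screen_w - 1) then [(max a.2 0, min b.1 (screen_w - 1))] else [])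
        ++ bPairs screen_w r
  | _ => []

-- _cross: crossing of an edge with row y
def bCross (e : Int × Int × Int × Int) (y : Int) : Int × Int :=
  let q := PySem.Int.floordiv ((e.2.2.1 - e.1) * (y - e.2.1)) (e.2.2.2 - e.2.1)
  let r := PySem.Int.mod ((e.2.2.1 - e.1) * (y - e.2.1)) (e.2.2.2 - e.2.1)
  let fx := e.1 + q
  (fx, fx + (if r ≠ 0 then 1 else 0))

-- _row: one row's sorted crossings, paired
def bRow (edges : List (Int × Int × Int × Int)) (y screen_w screen_h : Int) : List (Int × Int) :=
  let xs := PySem.List.sorted2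
    ((edges.filter (fun e => decide (max e.2.1 0 ≤ y) && decide (y < min e.2.2.2 screen_h))).map
      (fun e => bCross e y)) (fun q => q.1) (fun q => q.2) false
  bPairs screen_w xs

-- normalised edge table
def bEdges (outline : List (Int × Int)) : List (Int × Int × Int × Int) :=
  let n : Int := PySem.List.len outline
  (PySem.List.pyRange 0 n 1).foldl (fun es i =>
    let p0 := PySem.List.pyGetD outline i ((0:Int),(0:Int))
    let p1 := PySem.List.pyGetD outline (PySem.Int.mod (i+1) n) ((0:Int),(0:Int))
    if p0.2 ≠ p1.2 then
      es ++ [if p0.2 > p1.2 then (p1.1, p1.2, p0.1, p0.2) else (p0.1, p0.2, p1.1, p1.2)]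
    else es) []

-- rows touched by any edge, in first-touch order; Python's 'seen' set ported as a hash set,
-- 'rows' built reversed and reversed once at the end (exact, see header)
def bRows (edges : List (Int × Int × Int × Int)) (screen_h : Int) : List Int :=
  (edges.foldl (fun (st : Std.HashSet Int × List Int) e =>
    (PySem.List.pyRange (max e.2.1 0) (min e.2.2.2 screen_h) 1).foldl
      (fun st y => match st with | (s, r) => if s.contains y then (s, r) else (s.insert y, y :: r)) st)
    (∅, [])).2.reverse

def build_span_table_alt (outline : List (Int × Int)) (screen_w : Int) (screen_h : Int) : List (Int × List (Int × Int)) :=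
  let edges := bEdges outline
  let rows := bRows edges screen_h
  -- the final dict comprehension: rows is duplicate-free, so the dict (as an insertion-ordered
  -- association list) IS the filtered list of (row, spans) pairs
  rows.filterMap (fun y =>
    let row := bRow edges y screen_w screen_h
    if row ≠ [] then some (y, row) else none)

-- ===== PRECONDITION & SPEC =====
def Spec_build_span_table (outline : List (Int × Int)) (screen_w : Int) (screen_h : Int) (out : List (Int × List (Int × Int))) : Prop := out = build_span_table_alt outline screen_w screen_h
instance (outline : List (Int × Int)) (screen_w : Int) (screen_h : Int) (out : List (Int × List (Int × Int))) : Decidable (Spec_build_span_table outline screen_w screen_h out) := by unfold Spec_build_span_table; infer_instance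

-- ===== CLAIM (what is proved, stated in full; the proofs are below) =====
def Claim_equal_build_span_table : Prop := ∀ (outline : List (Int × Int)) (screen_w : Int) (screen_h : Int), Dom_build_span_table outline screen_w screen_h → Spec_build_span_table outline screen_w screen_h (build_span_table outline screen_w screen_h)

-- ===== LEMMAS AND PROOFS =====

-- the oriented endpoints of one outline step
def orientE (pq : (Int × Int) × (Int × Int)) : Int × Int × Int × Int :=
  if pq.1.2 > pq.2.2 then (pq.2.1, pq.2.2, pq.1.1, pq.1.2) else (pq.1.1, pq.1.2, pq.2.1, pq.2.2)

-- the rows an edge touches, and its crossing-event stream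
def rngE (screen_h : Int) (e : Int × Int × Int × Int) : List Int :=
  PySem.List.pyRange (max e.2.1 0) (min e.2.2.2 screen_h) 1

def streamE (screen_h : Int) (e : Int × Int × Int × Int) : List (Int × (Int × Int)) :=
  (rngE screen_h e).map (fun y => (y, bCross e y))

-- one crossing event applied to A's (hash map, reversed keys) state
def dApp (st : Std.HashMap Int (List (Int × Int)) × List Int) (p : Int × (Int × Int)) :
    Std.HashMap Int (List (Int × Int)) × List Int :=
  match st with
  | (m, ord) =>
    let c := m.contains p.1
    (m.insert p.1 (m.getD p.1 [] ++ [p.2]), if c then ord else p.1 :: ord)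

def pairAt (outline : List (Int × Int)) (i : Int) : (Int × Int) × (Int × Int) :=
  (PySem.List.pyGetD outline i ((0:Int),(0:Int)),
   PySem.List.pyGetD outline (PySem.Int.mod (i+1) (PySem.List.len outline)) ((0:Int),(0:Int)))

theorem bEdges_eq (outline : List (Int × Int)) :
    bEdges outline
      = (((PySem.List.pyRange 0 (PySem.List.len outline) 1).map (pairAt outline)).filter
          (fun pq => decide (pq.1.2 ≠ pq.2.2))).map orientE := by
  rw [bEdges]
  have hb : (fun (es : List (Int × Int × Int × Int)) (i : Int) =>
      let p0 := PySem.List.pyGetD outline i ((0:Int),(0:Int))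
      let p1 := PySem.List.pyGetD outline (PySem.Int.mod (i+1) (PySem.List.len outline)) ((0:Int),(0:Int))
      if p0.2 ≠ p1.2 then
        es ++ [if p0.2 > p1.2 then (p1.1, p1.2, p0.1, p0.2) else (p0.1, p0.2, p1.1, p1.2)]
      else es)
      = fun es i => if (pairAt outline i).1.2 ≠ (pairAt outline i).2.2
          then es ++ [orientE (pairAt outline i)] else es := rfl
  rw [hb, ← List.foldl_map (f := pairAt outline)
    (g := fun es pq => if pq.1.2 ≠ pq.2.2 then es ++ [orientE pq] else es),
    PySem.List.foldl_append_ite (p := fun pq : (Int × Int) × (Int × Int) => pq.1.2 ≠ pq.2.2)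
      (f := orientE), List.nil_append]

theorem foldl_foldl_flatMap {α β γ : Type} (g : α → List β) (f : γ → β → γ) :
    ∀ (l : List α) (init : γ),
      l.foldl (fun acc x => (g x).foldl f acc) init = (l.flatMap g).foldl f init := by
  intro l
  induction l with
  | nil => intro init; rfl
  | cons x t ih => intro init; simp [List.foldl_append, ih]

-- the edge-major event stream, and a row's payload in it
def streamOf (outline : List (Int × Int)) (screen_h : Int) : List (Int × (Int × Int)) :=
  (bEdges outline).flatMap (streamE screen_h)

def payF (k : Int) (l : List (Int × (Int × Int))) : List (Int × Int) :=
  (l.filter (fun p => p.1 == k)).map (·.2)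

theorem payF_not_mem (k : Int) (l : List (Int × (Int × Int))) (h : k ∉ l.map (·.1)) :
    payF k l = [] := by
  rw [payF, List.filter_eq_nil_iff.mpr, List.map_nil]
  intro p hp
  simp only [beq_iff_eq]
  intro hk
  exact h (List.mem_map.mpr ⟨p, hp, hk⟩)

theorem innerA_eq (screen_h x0 y0 x1 y1 : Int)
    (cr : Std.HashMap Int (List (Int × Int)) × List Int) :
    (PySem.List.pyRange (max y0 0) (min y1 screen_h) 1).foldl (fun cr y =>
        match cr with
        | (m, ord) =>
          let num := (x1 - x0) * (y - y0)
          let q := PySem.Int.floordiv num (y1 - y0)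
          let floor_ix := x0 + q
          let rem := num - q * (y1 - y0)
          let c := m.contains y
          (m.insert y (m.getD y [] ++ [(floor_ix, floor_ix + (if rem ≠ 0 then 1 else 0))]),
           if c then ord else y :: ord)) cr
      = (streamE screen_h (x0, y0, x1, y1)).foldl dApp cr := by
  rw [streamE, rngE, List.foldl_map]
  apply PySem.List.foldl_congr_mem
  intro acc y _
  obtain ⟨m0, ord0⟩ := acc
  dsimp only [dApp, bCross]
  have hm : (x1-x0)*(y-y0) - PySem.Int.floordiv ((x1-x0)*(y-y0)) (y1-y0) * (y1-y0)
      = PySem.Int.mod ((x1-x0)*(y-y0)) (y1-y0) := by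
    have h := PySem.Int.floordiv_mul_add_mod ((x1-x0)*(y-y0)) (y1-y0)
    linarith
  rw [hm]

def edgeBodyA (screen_h : Int) (cr : Std.HashMap Int (List (Int × Int)) × List Int)
    (pq : (Int × Int) × (Int × Int)) : Std.HashMap Int (List (Int × Int)) × List Int :=
  if pq.1.2 = pq.2.2 then cr
  else
    let e := if pq.1.2 > pq.2.2 then (pq.2.1, pq.2.2, pq.1.1, pq.1.2) else (pq.1.1, pq.1.2, pq.2.1, pq.2.2)
    let x0 := e.1
    let y0 := e.2.1
    let x1 := e.2.2.1
    let y1 := e.2.2.2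
    let dx := x1 - x0
    let dy := y1 - y0
    (PySem.List.pyRange (max y0 0) (min y1 screen_h) 1).foldl (fun cr y =>
        match cr with
        | (m, ord) =>
          let num := dx * (y - y0)
          let q := PySem.Int.floordiv num dy
          let floor_ix := x0 + q
          let rem := num - q * dy
          let c := m.contains y
          (m.insert y (m.getD y [] ++ [(floor_ix, floor_ix + (if rem ≠ 0 then 1 else 0))]),
           if c then ord else y :: ord)) cr

theorem edgeBodyA_eq (screen_h : Int) (cr : Std.HashMap Int (List (Int × Int)) × List Int)
    (pq : (Int × Int) × (Int × Int)) :
    edgeBodyA screen_h cr pq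
      = if pq.1.2 ≠ pq.2.2 then (streamE screen_h (orientE pq)).foldl dApp cr else cr := by
  by_cases heq : pq.1.2 = pq.2.2
  · simp [edgeBodyA, heq]
  · by_cases hgt : pq.1.2 > pq.2.2
    · simp only [edgeBodyA, orientE, if_pos hgt, ne_eq, heq, not_false_eq_true, if_true]
      exact innerA_eq screen_h pq.2.1 pq.2.2 pq.1.1 pq.1.2 cr
    · simp only [edgeBodyA, orientE, if_neg hgt, ne_eq, heq, not_false_eq_true, if_true]
      exact innerA_eq screen_h pq.1.1 pq.1.2 pq.2.1 pq.2.2 cr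

def crossingsA (outline : List (Int × Int)) (screen_h : Int) :
    Std.HashMap Int (List (Int × Int)) × List Int :=
  (PySem.List.pyRange 0 (PySem.List.len outline) 1).foldl (fun cr i =>
    let p0 := PySem.List.pyGetD outline i ((0:Int),(0:Int))
    let p1 := PySem.List.pyGetD outline (PySem.Int.mod (i+1) (PySem.List.len outline)) ((0:Int),(0:Int))
    if p0.2 = p1.2 then cr
    else
      let e := if p0.2 > p1.2 then (p1.1, p1.2, p0.1, p0.2) else (p0.1, p0.2, p1.1, p1.2)
      let x0 := e.1
      let y0 := e.2.1
      let x1 := e.2.2.1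
      let y1 := e.2.2.2
      let dx := x1 - x0
      let dy := y1 - y0
      (PySem.List.pyRange (max y0 0) (min y1 screen_h) 1).foldl (fun cr y =>
          match cr with
          | (m, ord) =>
            let num := dx * (y - y0)
            let q := PySem.Int.floordiv num dy
            let floor_ix := x0 + q
            let rem := num - q * dy
            let c := m.contains y
            (m.insert y (m.getD y [] ++ [(floor_ix, floor_ix + (if rem ≠ 0 then 1 else 0))]),
             if c then ord else y :: ord)) cr)
    (∅, [])

theorem crossingsA_eq (outline : List (Int × Int)) (screen_h : Int) :
    crossingsA outline screen_h = (streamOf outline screen_h).foldl dApp (∅, []) := by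
  have step1 : crossingsA outline screen_h
      = ((PySem.List.pyRange 0 (PySem.List.len outline) 1).map (pairAt outline)).foldl
          (edgeBodyA screen_h) (∅, []) := by
    rw [List.foldl_map]
    rfl
  rw [step1]
  have step2 : ((PySem.List.pyRange 0 (PySem.List.len outline) 1).map (pairAt outline)).foldl
        (edgeBodyA screen_h) (∅, [])
      = ((PySem.List.pyRange 0 (PySem.List.len outline) 1).map (pairAt outline)).foldl
        (fun cr pq => if pq.1.2 ≠ pq.2.2 then (streamE screen_h (orientE pq)).foldl dApp cr else cr)
        (∅, []) := by
    apply PySem.List.foldl_congr_mem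
    intro acc pq _
    exact edgeBodyA_eq screen_h acc pq
  rw [step2, PySem.List.foldl_ite_eq_foldl_filter
    (p := fun pq : (Int × Int) × (Int × Int) => pq.1.2 ≠ pq.2.2)
    (f := fun cr pq => (streamE screen_h (orientE pq)).foldl dApp cr)]
  rw [show (fun (cr : Std.HashMap Int (List (Int × Int)) × List Int) (pq : (Int × Int) × (Int × Int)) =>
        (streamE screen_h (orientE pq)).foldl dApp cr)
      = fun cr pq => ((fun e => (streamE screen_h e).foldl dApp cr) (orientE pq)) from rfl]
  rw [← List.foldl_map (f := orientE)
    (g := fun (cr : Std.HashMap Int (List (Int × Int)) × List Int) e => (streamE screen_h e).foldl dApp cr)]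
  rw [← bEdges_eq, foldl_foldl_flatMap (streamE screen_h) dApp]
  rfl

-- invariant of the dApp fold: reversed keys are the first-touch dedup of the processed keys,
-- and each key maps to its payload in the processed prefix
theorem dApp_inv : ∀ (S : List (Int × (Int × Int)))
    (st : Std.HashMap Int (List (Int × Int)) × List Int) (l : List (Int × (Int × Int))),
    st.2.reverse = PySem.Set.ofList (l.map (·.1)) →
    (∀ k, st.1[k]? = if k ∈ l.map (·.1) then some (payF k l) else none) →
    (S.foldl dApp st).2.reverse = PySem.Set.ofList ((l ++ S).map (·.1)) ∧
    (∀ k, (S.foldl dApp st).1[k]? = if k ∈ (l ++ S).map (·.1) then some (payF k (l ++ S)) else none) := by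
  intro S
  induction S with
  | nil =>
    intro st l h1 h2
    simp only [List.foldl_nil, List.append_nil]
    exact ⟨h1, h2⟩
  | cons e T ih =>
    intro st l h1 h2
    obtain ⟨m0, ord0⟩ := st
    dsimp only at h1 h2
    have hmemiff : (m0[e.1]?).isSome ↔ e.1 ∈ l.map (·.1) := by
      rw [h2 e.1]
      by_cases hm : e.1 ∈ l.map (·.1) <;> simp [hm]
    have hgetD : m0.getD e.1 [] = payF e.1 l := by
      rw [Std.HashMap.getD_eq_getD_getElem?, h2 e.1]
      by_cases hm : e.1 ∈ l.map (·.1)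
      · simp [hm]
      · simp [hm, payF_not_mem e.1 l hm]
    have h1' : (dApp (m0, ord0) e).2.reverse = PySem.Set.ofList ((l ++ [e]).map (·.1)) := by
      rw [List.map_append, List.map_singleton, PySem.Set.ofList_append_singleton]
      dsimp only [dApp]
      by_cases hm : e.1 ∈ l.map (·.1)
      · have hc : m0.contains e.1 = true := by
          rw [Std.HashMap.contains_eq_isSome_getElem?]
          exact hmemiff.mpr hm
        rw [hc, if_pos rfl, h1, PySem.Set.add_of_mem ((PySem.Set.mem_ofList _ _).mpr hm)]
      · have hc : m0.contains e.1 = false := by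
          rw [Std.HashMap.contains_eq_isSome_getElem?, Bool.eq_false_iff]
          intro h
          exact hm (hmemiff.mp (by simpa using h))
        rw [hc, if_neg (by simp), List.reverse_cons, h1,
          PySem.Set.add_of_not_mem (fun h => hm ((PySem.Set.mem_ofList _ _).mp h))]
    have h2' : ∀ k, (dApp (m0, ord0) e).1[k]? = if k ∈ (l ++ [e]).map (·.1) then some (payF k (l ++ [e])) else none := by
      intro k
      have hpay : payF k (l ++ [e]) = payF k l ++ (if e.1 == k then [e.2] else []) := by
        rw [payF, payF, List.filter_append, List.map_append]
        congr 1
        by_cases hek : e.1 == k <;> simp [hek]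
      dsimp only [dApp]
      rw [Std.HashMap.getElem?_insert]
      by_cases hek : e.1 = k
      · subst hek
        have hmem : e.1 ∈ (l ++ [e]).map (·.1) := by simp
        simp only [BEq.rfl, if_true, if_pos hmem, hgetD, hpay]
      · have hbeq : (e.1 == k) = false := by simp [hek]
        rw [hbeq]
        simp only [Bool.false_eq_true, if_false]
        rw [h2 k, hpay, hbeq]
        simp only [Bool.false_eq_true, if_false, List.append_nil]
        have hmem : (k ∈ (l ++ [e]).map (·.1)) ↔ k ∈ l.map (·.1) := by
          simp [Ne.symm hek]
        rw [if_congr hmem rfl rfl]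
    rw [List.foldl_cons]
    have := ih (dApp (m0, ord0) e) (l ++ [e]) h1' h2'
    rwa [List.append_assoc, List.singleton_append] at this

-- B's rows list: invariant of the first-touch fold
theorem hs_inv : ∀ (L : List Int) (st : Std.HashSet Int × List Int) (l : List Int),
    st.2.reverse = PySem.Set.ofList l → (∀ x, x ∈ st.1 ↔ x ∈ l) →
    (L.foldl (fun st y => match st with | (s, r) => if s.contains y then (s, r) else (s.insert y, y :: r)) st).2.reverse
        = PySem.Set.ofList (l ++ L) ∧
    (∀ x, x ∈ (L.foldl (fun st y => match st with | (s, r) => if s.contains y then (s, r) else (s.insert y, y :: r)) st).1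
        ↔ x ∈ l ++ L) := by
  intro L
  induction L with
  | nil =>
    intro st l h1 h2
    simp only [List.foldl_nil, List.append_nil]
    exact ⟨h1, h2⟩
  | cons y T ih =>
    intro st l h1 h2
    obtain ⟨s0, r0⟩ := st
    dsimp only at h1 h2
    rw [List.foldl_cons]
    dsimp only
    by_cases hm : y ∈ l
    · have hc : s0.contains y = true := Std.HashSet.contains_iff_mem.mpr ((h2 y).mpr hm)
      rw [if_pos hc]
      have h1' : ((s0, r0) : Std.HashSet Int × List Int).2.reverse = PySem.Set.ofList (l ++ [y]) := by
        dsimp only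
        rw [h1, PySem.Set.ofList_append_singleton,
          PySem.Set.add_of_mem ((PySem.Set.mem_ofList _ _).mpr hm)]
      have h2' : ∀ x, x ∈ ((s0, r0) : Std.HashSet Int × List Int).1 ↔ x ∈ l ++ [y] := by
        intro x
        dsimp only
        rw [h2 x]
        simp only [List.mem_append, List.mem_singleton]
        constructor
        · exact Or.inl
        · rintro (h | rfl)
          · exact h
          · exact hm
      have := ih (s0, r0) (l ++ [y]) h1' h2'
      rwa [List.append_assoc, List.singleton_append] at this
    · have hc : s0.contains y = false := by
        rw [Bool.eq_false_iff]
        exact fun h => hm ((h2 y).mp (Std.HashSet.contains_iff_mem.mp h))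
      rw [hc, if_neg (by simp)]
      have h1' : ((s0.insert y, y :: r0) : Std.HashSet Int × List Int).2.reverse
          = PySem.Set.ofList (l ++ [y]) := by
        dsimp only
        rw [List.reverse_cons, h1, PySem.Set.ofList_append_singleton,
          PySem.Set.add_of_not_mem (fun h => hm ((PySem.Set.mem_ofList _ _).mp h))]
      have h2' : ∀ x, x ∈ ((s0.insert y, y :: r0) : Std.HashSet Int × List Int).1 ↔ x ∈ l ++ [y] := by
        intro x
        dsimp only
        rw [Std.HashSet.mem_insert]
        simp only [beq_iff_eq, List.mem_append, List.mem_singleton, h2 x]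
        tauto
      have := ih (s0.insert y, y :: r0) (l ++ [y]) h1' h2'
      rwa [List.append_assoc, List.singleton_append] at this

theorem bRows_eq (outline : List (Int × Int)) (screen_h : Int) :
    bRows (bEdges outline) screen_h = PySem.Set.ofList ((streamOf outline screen_h).map (·.1)) := by
  have h2 : (bEdges outline).foldl (fun (st : Std.HashSet Int × List Int) e =>
      (PySem.List.pyRange (max e.2.1 0) (min e.2.2.2 screen_h) 1).foldl
        (fun st y => match st with | (s, r) => if s.contains y then (s, r) else (s.insert y, y :: r)) st)
      (∅, [])
      = ((bEdges outline).flatMap (fun e => PySem.List.pyRange (max e.2.1 0) (min e.2.2.2 screen_h) 1)).foldl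
        (fun st y => match st with | (s, r) => if s.contains y then (s, r) else (s.insert y, y :: r))
        (∅, []) :=
    foldl_foldl_flatMap _ _ _ _
  have hkeys : (streamOf outline screen_h).map (·.1)
      = (bEdges outline).flatMap (fun e => PySem.List.pyRange (max e.2.1 0) (min e.2.2.2 screen_h) 1) := by
    rw [streamOf, List.map_flatMap]
    apply List.flatMap_congr
    intro e _
    rw [streamE, rngE, List.map_map,
      show ((fun x : Int × (Int × Int) => x.1) ∘ fun y => (y, bCross e y)) = id from rfl,
      List.map_id]
  rw [bRows, h2, hkeys]
  exact (hs_inv _ (∅, []) [] (by rfl) (by simp)).1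

theorem nodup_filter_beq (y : Int) : ∀ (l : List Int), l.Nodup → l.filter (· == y) = if y ∈ l then [y] else [] := by
  intro l
  induction l with
  | nil => simp
  | cons a t ih =>
    intro h
    rcases List.nodup_cons.mp h with ⟨ha, ht⟩
    rw [List.filter_cons]
    by_cases hay : a = y
    · subst hay
      simp [ih ht, ha]
    · have hf : (a == y) = false := by simp [hay]
      simp only [hf, Bool.false_eq_true, if_false, ih ht]
      have hiff : (y ∈ a :: t) ↔ y ∈ t := by simp [Ne.symm hay]
      rw [if_congr hiff rfl rfl]

-- per-row payloads of the stream = B's row-major gather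
theorem payload_eq (outline : List (Int × Int)) (screen_h y : Int) :
    payF y (streamOf outline screen_h)
      = ((bEdges outline).filter
          (fun e => decide (max e.2.1 0 ≤ y) && decide (y < min e.2.2.2 screen_h))).map
          (fun e => bCross e y) := by
  rw [payF, streamOf, List.filter_flatMap, List.map_flatMap]
  have hfm : ∀ (l : List (Int × Int × Int × Int)) (p : (Int × Int × Int × Int) → Bool)
      (f : (Int × Int × Int × Int) → Int × Int),
      (l.filter p).map f = l.flatMap (fun e => if p e then [f e] else []) := by
    intro l p f
    induction l with
    | nil => rfl
    | cons a t ih =>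
      rw [List.filter_cons, List.flatMap_cons, ← ih]
      by_cases h : p a = true <;> simp [h]
  rw [hfm]
  apply List.flatMap_congr
  intro e _
  rw [streamE, List.filter_map]
  have hcomp : ((fun p : Int × (Int × Int) => p.1 == y) ∘ fun z => (z, bCross e z))
      = fun z => z == y := rfl
  rw [hcomp, nodup_filter_beq y (rngE screen_h e) (by rw [rngE]; exact PySem.List.nodup_pyRange_one _ _)]
  have hmem : (y ∈ rngE screen_h e) ↔ (max e.2.1 0 ≤ y ∧ y < min e.2.2.2 screen_h) := by
    rw [rngE]; exact PySem.List.mem_pyRange_one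
  by_cases hc : max e.2.1 0 ≤ y ∧ y < min e.2.2.2 screen_h
  · rw [if_pos (hmem.mpr hc)]
    simp [hc.1, hc.2]
  · rw [if_neg (fun h => hc (hmem.mp h))]
    rcases not_and_or.mp hc with h | h <;> simp [h]

theorem pairLoopA_eq_aux (w : Int) (xs : List (Int × Int)) :
    ∀ (k i : Nat) (acc : List (Int × Int)), xs.length - i ≤ k →
      pairLoopA w xs i acc = acc ++ bPairs w (xs.drop i) := by
  intro k
  induction k with
  | zero =>
    intro i acc hk
    rw [pairLoopA, dif_neg (by omega)]
    rw [List.drop_eq_nil_of_le (by omega)]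
    simp [bPairs]
  | succ k ih =>
    intro i acc hk
    by_cases h : i + 1 < xs.length
    · rw [pairLoopA, dif_pos h]
      have hd : xs.drop i = xs[i] :: xs[i+1] :: xs.drop (i+2) := by
        rw [List.drop_eq_getElem_cons (by omega), List.drop_eq_getElem_cons (by omega)]
      rw [ih (i+2) _ (by omega), hd]
      have e1 : (if (xs.getD i ((0:Int),(0:Int))).2 < 0 then (0:Int) else (xs.getD i ((0:Int),(0:Int))).2)
          = max (xs[i]).2 0 := by
        rw [List.getD_eq_getElem xs _ (by omega)]
        split <;> omega
      have e2 : (if w ≤ (xs.getD (i+1) ((0:Int),(0:Int))).1 then w - 1 else (xs.getD (i+1) ((0:Int),(0:Int))).1)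
          = min (xs[i+1]).1 (w - 1) := by
        rw [List.getD_eq_getElem xs _ (by omega)]
        split <;> omega
      rw [e1, e2]
      show (if max (xs[i]).2 0 ≤ min (xs[i+1]).1 (w-1) then acc ++ [(max (xs[i]).2 0, min (xs[i+1]).1 (w-1))] else acc)
        ++ bPairs w (xs.drop (i+2)) = _
      rw [show bPairs w (xs[i] :: xs[i+1] :: xs.drop (i+2))
          = (if max (xs[i]).2 0 ≤ min (xs[i+1]).1 (w - 1) then [(max (xs[i]).2 0, min (xs[i+1]).1 (w - 1))] else [])
            ++ bPairs w (xs.drop (i+2)) from rfl]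
      by_cases hc : max (xs[i]).2 0 ≤ min (xs[i+1]).1 (w-1) <;> simp [hc]
    · rw [pairLoopA, dif_neg h]
      rcases hd : xs.drop i with _ | ⟨x, t⟩
      · simp [bPairs]
      · rcases ht : t with _ | ⟨y, t'⟩
        · simp [bPairs]
        · exfalso
          have hlen := congrArg List.length hd
          simp [ht] at hlen
          omega

theorem pairLoopA_eq (w : Int) (xs : List (Int × Int)) :
    pairLoopA w xs 0 [] = bPairs w xs := by
  rw [pairLoopA_eq_aux w xs xs.length 0 [] (by omega), List.drop_zero, List.nil_append]

-- the reversed cons-accumulator loop is a filterMap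
theorem foldl_consIf_reverse {α β : Type} (g : α → β) (P : α → Prop) [DecidablePred P] :
    ∀ (l : List α) (acc : List β),
      (l.foldl (fun acc x => if P x then g x :: acc else acc) acc).reverse
        = acc.reverse ++ l.filterMap (fun x => if P x then some (g x) else none) := by
  intro l
  induction l with
  | nil => intro acc; simp
  | cons x t ih =>
    intro acc
    rw [List.foldl_cons, List.filterMap_cons]
    by_cases h : P x
    · simp only [h, if_true, ih (g x :: acc), List.reverse_cons]
      simp
    · simp only [h, if_false, ih acc]

theorem main_eq (outline : List (Int × Int)) (screen_w screen_h : Int) :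
    build_span_table outline screen_w screen_h = build_span_table_alt outline screen_w screen_h := by
  have hA : build_span_table outline screen_w screen_h
      = (((crossingsA outline screen_h).2.reverse.map
            (fun y => (y, (crossingsA outline screen_h).1.getD y []))).foldl (fun sp p =>
          let xs := PySem.List.sorted2 p.2 (fun q => q.1) (fun q => q.2) false
          let row_spans := pairLoopA screen_w xs 0 []
          if row_spans ≠ [] then (p.1, row_spans) :: sp else sp) []).reverse := rfl
  have hB : build_span_table_alt outline screen_w screen_h
      = (bRows (bEdges outline) screen_h).filterMap (fun y =>
          let row := bRow (bEdges outline) y screen_w screen_h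
          if row ≠ [] then some (y, row) else none) := rfl
  obtain ⟨hkeys, hget⟩ := dApp_inv (streamOf outline screen_h) (∅, []) []
    (by rfl) (by intro k; simp)
  rw [List.nil_append] at hkeys hget
  have hitems : (crossingsA outline screen_h).2.reverse.map
        (fun y => (y, (crossingsA outline screen_h).1.getD y []))
      = (PySem.Set.ofList ((streamOf outline screen_h).map (·.1))).map
          (fun y => (y, payF y (streamOf outline screen_h))) := by
    rw [crossingsA_eq, hkeys]
    apply List.map_congr_left
    intro y hy
    have hm : y ∈ (streamOf outline screen_h).map (·.1) := (PySem.Set.mem_ofList _ _).mp hy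
    rw [Std.HashMap.getD_eq_getD_getElem?, hget y, if_pos hm]
    rfl
  rw [hA, hB, hitems, List.foldl_map, bRows_eq]
  rw [foldl_consIf_reverse
    (g := fun y => (y, pairLoopA screen_w
      (PySem.List.sorted2 (payF y (streamOf outline screen_h)) (fun q => q.1) (fun q => q.2) false) 0 []))
    (P := fun y => pairLoopA screen_w
      (PySem.List.sorted2 (payF y (streamOf outline screen_h)) (fun q => q.1) (fun q => q.2) false) 0 [] ≠ [])]
  rw [List.reverse_nil, List.nil_append]
  apply List.filterMap_congr
  intro y _
  simp only [bRow, payload_eq outline screen_h y, pairLoopA_eq]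

-- ===== VERDICT (by name: the statement is the Claim_ definition above) =====
theorem build_span_table_spec : Claim_equal_build_span_table := by
  intro outline screen_w screen_h _
  exact main_eq outline screen_w screen_h
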